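-- pv_equiv track=rewrite | github.com/kkhansdah/Aviatorking_bot | predictor.py | predict_from_list
-- ===== SOURCE A (Python) =====
-- def predict_from_list(nums):
--     result = {"3x": 0, "5x": 0, "10x": 0, "20x": 0}
--     for num in nums:
--         if num >= 3:
--             result["3x"] += 1
--         if num >= 5:
--             result["5x"] += 1
--         if num >= 10:
--             result["10x"] += 1
--         if num >= 20:
--             result["20x"] += 1
--     return result
-- ===== SOURCE B (Python) =====
-- def predict_from_list(nums):
--     # Classify each element into the highest band it reaches, then take suffix sums.
--     b3 = b5 = b10 = b20 = 0
--     for num in nums: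
--         if num >= 20:
--             b20 += 1
--         elif num >= 10:
--             b10 += 1
--         elif num >= 5:
--             b5 += 1
--         elif num >= 3:
--             b3 += 1
--     c20 = b20
--     c10 = c20 + b10
--     c5 = c10 + b5
--     c3 = c5 + b3
--     return {"3x": c3, "5x": c5, "10x": c10, "20x": c20}
-- ===== Notes on version B (the rewrite author's own statement) =====
-- stated objective: alternative
-- what changed: Instead of testing all four thresholds per element, B classifies each element into the single highest band it reaches (one if/elif chain), tallies the four disjoint bands, and fills the dict with cumulative suffix sums of the band counts.
import Mathlib
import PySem

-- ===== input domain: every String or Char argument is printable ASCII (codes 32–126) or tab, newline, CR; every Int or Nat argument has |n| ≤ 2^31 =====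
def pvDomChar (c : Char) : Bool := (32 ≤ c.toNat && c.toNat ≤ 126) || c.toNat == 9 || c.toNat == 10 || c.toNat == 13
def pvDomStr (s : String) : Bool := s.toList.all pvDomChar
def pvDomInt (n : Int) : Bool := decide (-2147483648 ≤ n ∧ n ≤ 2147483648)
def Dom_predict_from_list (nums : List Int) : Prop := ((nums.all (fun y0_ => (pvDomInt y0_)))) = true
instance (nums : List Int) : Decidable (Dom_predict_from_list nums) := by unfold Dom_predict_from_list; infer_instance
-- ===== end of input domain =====

-- B counts each element once into its highest threshold band (if/elif) and fills the dict by
-- cumulative suffix sums; a different decomposition at the same O(n) cost.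

-- ===== PORT A =====
-- one loop iteration of A: four independent threshold tests, each bumping its dict entry
def predictStepA (r : PySem.Dict String Int) (num : Int) : PySem.Dict String Int :=
  let r := if num ≥ 3 then r.modify "3x" 0 (· + 1) else r
  let r := if num ≥ 5 then r.modify "5x" 0 (· + 1) else r
  let r := if num ≥ 10 then r.modify "10x" 0 (· + 1) else r
  if num ≥ 20 then r.modify "20x" 0 (· + 1) else r

def predict_from_list (nums : List Int) : List (String × Int) :=
  (nums.foldl predictStepA
    (PySem.Dict.ofList [("3x", 0), ("5x", 0), ("10x", 0), ("20x", 0)])).items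

-- ===== PORT B =====
-- one loop iteration of B: if/elif chain bumps exactly the highest band reached
def predictStepB (s : Int × Int × Int × Int) (num : Int) : Int × Int × Int × Int :=
  let (b3, b5, b10, b20) := s
  if num ≥ 20 then (b3, b5, b10, b20 + 1)
  else if num ≥ 10 then (b3, b5, b10 + 1, b20)
  else if num ≥ 5 then (b3, b5 + 1, b10, b20)
  else if num ≥ 3 then (b3 + 1, b5, b10, b20)
  else (b3, b5, b10, b20)

def predict_from_list_alt (nums : List Int) : List (String × Int) :=
  let (b3, b5, b10, b20) := nums.foldl predictStepB (0, 0, 0, 0)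
  let c20 := b20
  let c10 := c20 + b10
  let c5 := c10 + b5
  let c3 := c5 + b3
  [("3x", c3), ("5x", c5), ("10x", c10), ("20x", c20)]

-- ===== PRECONDITION & SPEC =====
def Spec_predict_from_list (nums : List Int) (out : List (String × Int)) : Prop := out = predict_from_list_alt nums
instance (nums : List Int) (out : List (String × Int)) : Decidable (Spec_predict_from_list nums out) := by unfold Spec_predict_from_list; infer_instance

-- ===== CLAIM (what is proved, stated in full; the proofs are below) =====
def Claim_equal_predict_from_list : Prop := ∀ (nums : List Int), Dom_predict_from_list nums → Spec_predict_from_list nums (predict_from_list nums)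

-- ===== LEMMAS AND PROOFS =====

-- number of elements ≥ t
def pvCnt (t : Int) (nums : List Int) : Int := nums.countP (fun x => t ≤ x)

-- number of elements in the band [lo, hi)
def pvBand (lo hi : Int) (nums : List Int) : Int := nums.countP (fun x => lo ≤ x ∧ x < hi)

lemma pvCnt_band (lo hi : Int) (h : lo ≤ hi) (nums : List Int) :
    pvCnt lo nums = pvBand lo hi nums + pvCnt hi nums := by
  induction nums with
  | nil => simp [pvCnt, pvBand]
  | cons x xs ih =>
    simp only [pvCnt, pvBand, List.countP_cons] at *
    by_cases h1 : lo ≤ x <;> by_cases h2 : hi ≤ x <;>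
      simp [*] <;> omega

lemma foldA_eq (nums : List Int) (a b c d : Int) :
    nums.foldl predictStepA (PySem.Dict.mk [("3x", a), ("5x", b), ("10x", c), ("20x", d)]) =
      PySem.Dict.mk [("3x", a + pvCnt 3 nums), ("5x", b + pvCnt 5 nums),
                     ("10x", c + pvCnt 10 nums), ("20x", d + pvCnt 20 nums)] := by
  induction nums generalizing a b c d with
  | nil => simp [pvCnt]
  | cons x xs ih =>
    simp only [List.foldl_cons]
    have hstep : predictStepA (PySem.Dict.mk [("3x", a), ("5x", b), ("10x", c), ("20x", d)]) x =
        PySem.Dict.mk [("3x", a + if 3 ≤ x then 1 else 0), ("5x", b + if 5 ≤ x then 1 else 0),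
                       ("10x", c + if 10 ≤ x then 1 else 0), ("20x", d + if 20 ≤ x then 1 else 0)] := by
      simp only [predictStepA, ge_iff_le]
      by_cases h3 : (3:Int) ≤ x <;> by_cases h5 : (5:Int) ≤ x <;>
        by_cases h10 : (10:Int) ≤ x <;> by_cases h20 : (20:Int) ≤ x <;>
        simp [h3, h5, h10, h20, PySem.Dict.modify, PySem.Dict.insert, PySem.Dict.contains,
          PySem.Dict.getD, PySem.Dict.get?]
    rw [hstep, ih]
    simp only [pvCnt, List.countP_cons, PySem.Dict.mk.injEq]
    by_cases h3 : (3:Int) ≤ x <;> by_cases h5 : (5:Int) ≤ x <;>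
      by_cases h10 : (10:Int) ≤ x <;> by_cases h20 : (20:Int) ≤ x <;>
      simp [h3, h5, h10, h20] <;> omega

lemma foldB_eq (nums : List Int) (b3 b5 b10 b20 : Int) :
    nums.foldl predictStepB (b3, b5, b10, b20) =
      (b3 + pvBand 3 5 nums, b5 + pvBand 5 10 nums, b10 + pvBand 10 20 nums, b20 + pvCnt 20 nums) := by
  induction nums generalizing b3 b5 b10 b20 with
  | nil => simp [pvCnt, pvBand]
  | cons x xs ih =>
    simp only [List.foldl_cons, predictStepB]
    by_cases h20 : x ≥ 20 <;> by_cases h10 : x ≥ 10 <;> by_cases h5 : x ≥ 5 <;> by_cases h3 : x ≥ 3 <;>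
      simp only [h20, h10, h5, h3, if_true, if_false, ih,
        pvCnt, pvBand, List.countP_cons] <;>
      simp_all <;> omega

-- ===== VERDICT (by name: the statement is the Claim_ definition above) =====
theorem predict_from_list_spec : Claim_equal_predict_from_list := by
  intro nums _
  show predict_from_list nums = predict_from_list_alt nums
  have hA : predict_from_list nums =
      [("3x", pvCnt 3 nums), ("5x", pvCnt 5 nums), ("10x", pvCnt 10 nums), ("20x", pvCnt 20 nums)] := by
    have : PySem.Dict.ofList ([("3x", (0:Int)), ("5x", 0), ("10x", 0), ("20x", 0)]) =
        PySem.Dict.mk [("3x", 0), ("5x", 0), ("10x", 0), ("20x", 0)] := by decide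
    simp [predict_from_list, this, foldA_eq]
  rw [hA]
  simp only [predict_from_list_alt, foldB_eq]
  have e3 := pvCnt_band 3 5 (by norm_num) nums
  have e5 := pvCnt_band 5 10 (by norm_num) nums
  have e10 := pvCnt_band 10 20 (by norm_num) nums
  simp only [List.cons.injEq, Prod.mk.injEq, and_true, true_and]
  refine ⟨by omega, by omega, by omega⟩
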